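-- pv_equiv track=rewrite | github.com/engrmrdc/Python_Exercises | Life-in-Pixels.py | string_to_rgb
-- ===== SOURCE A (Python) =====
-- def string_to_rgb(input_string):
--     # Check if the input string is empty or contains non-alphabetic characters.
--     if not input_string.isalpha():
--         return [0, 0, 0]
--
--     # Convert the input string to lowercase for case-insensitive mapping.
--     input_string = input_string.lower()
--
--     # Initialize RGB values to 0.
--     red, green, blue = 0, 0, 0
--
--     # Map each character to RGB values.
--     for char in input_string:
--         char_value = ord(char) - ord('a') + 1  # Map 'a' to 1, 'b' to 2, and so on.
--         red = (red + char_value) % 256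
--         green = (green + char_value * 2) % 256
--         blue = (blue + char_value * 3) % 256
--
--     return [red, green, blue]
-- ===== SOURCE B (Python) =====
-- def string_to_rgb(input_string):
--     if not input_string.isalpha():
--         return [0, 0, 0]
--     # Histogram of the lowercased string, then one weighted sum over the
--     # distinct letters: s = sum(multiplicity * letter_value).
--     counts = {}
--     for ch in input_string.lower():
--         counts[ch] = counts.get(ch, 0) + 1
--     s = 0
--     for ch, n in counts.items():
--         s += n * (ord(ch) - ord('a') + 1)
--     return [s % 256, (s * 2) % 256, (s * 3) % 256]
-- ===== Notes on version B (the rewrite author's own statement) =====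
-- stated objective: faster
-- what changed: B builds a character-frequency dictionary of the lowercased string first and then computes one weighted sum over the distinct letters (multiplicity * letter value), deriving the three channels as S%256, 2S%256, 3S%256, instead of A's per-character updates of three modular accumulators; the per-character work shrinks to a dict increment and the arithmetic moves to the (at most 26) distinct keys.
import Mathlib
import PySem

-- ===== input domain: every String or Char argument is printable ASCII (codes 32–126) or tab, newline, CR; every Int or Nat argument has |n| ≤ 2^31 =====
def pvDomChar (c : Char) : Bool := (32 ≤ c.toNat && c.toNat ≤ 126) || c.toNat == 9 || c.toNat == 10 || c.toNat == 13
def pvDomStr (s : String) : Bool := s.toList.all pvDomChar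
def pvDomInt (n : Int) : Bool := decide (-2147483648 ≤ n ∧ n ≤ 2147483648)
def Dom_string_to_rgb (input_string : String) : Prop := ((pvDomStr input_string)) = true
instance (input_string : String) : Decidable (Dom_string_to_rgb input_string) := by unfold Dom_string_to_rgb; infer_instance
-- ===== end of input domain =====

-- B builds a histogram (dict) of the lowercased string and computes one weighted sum over the
-- distinct letters, deriving the three channels by a closed form, instead of A's three
-- per-character mod-accumulators.


-- ===== PORT A =====
def string_to_rgb (input_string : String) : List Int :=
  if ¬ (PySem.Str.strIsalpha input_string) then [0, 0, 0]
  else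
    let lowered := PySem.Str.lower input_string
    let st := lowered.toList.foldl
      (fun (acc : Int × Int × Int) c =>
        let char_value : Int := (c.toNat : Int) - 97 + 1
        ((acc.1 + char_value) % 256,
         (acc.2.1 + char_value * 2) % 256,
         (acc.2.2 + char_value * 3) % 256))
      (0, 0, 0)
    [st.1, st.2.1, st.2.2]

-- ===== PORT B =====
def string_to_rgb_alt (input_string : String) : List Int :=
  if ¬ (PySem.Str.strIsalpha input_string) then [0, 0, 0]
  else
    -- counts[ch] = counts.get(ch, 0) + 1 over the lowercased string
    let counts := (PySem.Str.lower input_string).toList.foldl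
      (fun (d : PySem.Dict Char Int) ch => d.insert ch (d.getD ch 0 + 1)) PySem.Dict.empty
    -- s += n * (ord(ch) - ord('a') + 1) over counts.items()
    let s := counts.items.foldl
      (fun (acc : Int) p => acc + p.2 * ((p.1.toNat : Int) - 97 + 1)) 0
    [s % 256, (s * 2) % 256, (s * 3) % 256]

-- ===== PRECONDITION & SPEC =====
def Spec_string_to_rgb (input_string : String) (out : List Int) : Prop := out = string_to_rgb_alt input_string
instance (input_string : String) (out : List Int) : Decidable (Spec_string_to_rgb input_string out) := by unfold Spec_string_to_rgb; infer_instance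

-- ===== CLAIM (what is proved, stated in full; the proofs are below) =====
def Claim_equal_string_to_rgb : Prop := ∀ (input_string : String), Dom_string_to_rgb input_string → Spec_string_to_rgb input_string (string_to_rgb input_string)

-- ===== LEMMAS AND PROOFS =====

-- B's histogram-weighted sum equals the plain sum of letter values over the string
theorem pv_hist_sum (cs : List Char) :
    ((cs.foldl (fun (d : PySem.Dict Char Int) ch => d.insert ch (d.getD ch 0 + 1))
        PySem.Dict.empty).items.foldl
      (fun (acc : Int) p => acc + p.2 * ((p.1.toNat : Int) - 97 + 1)) 0)
      = (cs.map (fun c => (c.toNat : Int) - 97 + 1)).sum := by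
  rw [PySem.Dict.foldl_insert_getD_add_one_eq_counter, PySem.List.foldl_add, zero_add,
    PySem.Dict.items_counter, List.map_map]
  have hnd : (PySem.Set.ofList cs).Nodup := PySem.Set.nodup_ofList cs
  have hfin : (PySem.Set.ofList cs).toFinset = cs.toFinset := by
    ext x; simp [PySem.Set.mem_ofList]
  rw [← List.sum_toFinset _ hnd, hfin, Finset.sum_list_map_count]
  refine Finset.sum_congr rfl (fun m _ => ?_)
  simp [Function.comp]

-- A's triple-accumulator fold computed in terms of the plain sum of letter values
theorem pv_fold_eq (cs : List Char) (r g b : Int) :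
    cs.foldl
      (fun (acc : Int × Int × Int) c =>
        ((acc.1 + ((c.toNat : Int) - 97 + 1)) % 256,
         (acc.2.1 + ((c.toNat : Int) - 97 + 1) * 2) % 256,
         (acc.2.2 + ((c.toNat : Int) - 97 + 1) * 3) % 256))
      (r % 256, g % 256, b % 256)
      = (let S := (cs.map (fun c => (c.toNat : Int) - 97 + 1)).sum
         ((r + S) % 256, (g + 2 * S) % 256, (b + 3 * S) % 256)) := by
  induction cs generalizing r g b with
  | nil =>
    simp only [List.foldl_nil, List.map_nil, List.sum_nil]
    refine Prod.ext ?_ (Prod.ext ?_ ?_) <;> simp only <;> omega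
  | cons c cs ih =>
    simp only [List.foldl_cons, List.map_cons, List.sum_cons]
    have h1 : (r % 256 + ((c.toNat : Int) - 97 + 1)) % 256
        = (r + ((c.toNat : Int) - 97 + 1)) % 256 := by omega
    have h2 : (g % 256 + ((c.toNat : Int) - 97 + 1) * 2) % 256
        = (g + ((c.toNat : Int) - 97 + 1) * 2) % 256 := by omega
    have h3 : (b % 256 + ((c.toNat : Int) - 97 + 1) * 3) % 256
        = (b + ((c.toNat : Int) - 97 + 1) * 3) % 256 := by omega
    simp only [h1, h2, h3]
    rw [ih]
    set v : Int := (c.toNat : Int) - 97 + 1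
    set S : Int := (cs.map (fun c => (c.toNat : Int) - 97 + 1)).sum
    simp only
    refine Prod.ext ?_ (Prod.ext ?_ ?_) <;> simp only <;> omega

-- ===== VERDICT (by name: the statement is the Claim_ definition above) =====
theorem string_to_rgb_spec : Claim_equal_string_to_rgb := by
  intro s _
  unfold Spec_string_to_rgb string_to_rgb string_to_rgb_alt
  by_cases h : PySem.Str.strIsalpha s
  · rw [if_neg (not_not_intro h), if_neg (not_not_intro h)]
    have h0 : ((0 : Int), (0 : Int), (0 : Int)) = ((0 : Int) % 256, (0 : Int) % 256, (0 : Int) % 256) := by decide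
    dsimp only
    rw [h0, pv_fold_eq, pv_hist_sum]
    set S : Int := ((PySem.Str.lower s).toList.map (fun c => (c.toNat : Int) - 97 + 1)).sum
    simp only [List.cons.injEq, and_true]
    refine ⟨by omega, by omega, by omega⟩
  · rw [if_pos h, if_pos h]
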